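-- pv_equiv track=rewrite | github.com/arsbw2802/Multimodal_Prediction | TDOST/TDOST/generate_embeddings_v1.py | get_cairo_sensor_global_context
-- ===== SOURCE A (Python) =====
-- def get_cairo_sensor_global_context(raw_sensor):
--     sensor_mapping = {
--         ("M001", "T002"): "in work area / office",
--         ("M002",): "in aisle near bedroom and guest bedroom",
--         ("M003",): "in aisle near stairs",
--         ("M004",): "in guest bedroom",
--         ("M005", "M006", "M007", "M008", "M009", "T001"): "in bedroom",
--         ("M010",): "near top of stairs",
--         ("M011",): "in living room near bottom of stairs",
--         ("M012", "M019", "M021", "M022", "M024", "T004"): "in kitchen",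
--         ("M013", "M016", "M017", "M018", "M023", "T003", "T005"): "in living room",
--         ("M014",): "between living room and stairs",
--         ("M015",): "between living room and entrance door",
--         ("M020",): "between dining area and kitchen",
--         ("M025",): "between other room and garage",
--         ("M026",): "in laundry room near garage",
--         ("M027",): "near garage door"
--     }
--
--     for sensor_codes, context in sensor_mapping.items():
--         if raw_sensor in sensor_codes:
--             return context
--
--     return None  # Or a default value if the sensor is not found
-- ===== SOURCE B (Python) =====
-- # Flat per-code dict + single .get lookup instead of scanning grouped tuples.
-- _SENSOR_CONTEXT = {
--     "M001": "in work area / office",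
--     "T002": "in work area / office",
--     "M002": "in aisle near bedroom and guest bedroom",
--     "M003": "in aisle near stairs",
--     "M004": "in guest bedroom",
--     "M005": "in bedroom",
--     "M006": "in bedroom",
--     "M007": "in bedroom",
--     "M008": "in bedroom",
--     "M009": "in bedroom",
--     "T001": "in bedroom",
--     "M010": "near top of stairs",
--     "M011": "in living room near bottom of stairs",
--     "M012": "in kitchen",
--     "M019": "in kitchen",
--     "M021": "in kitchen",
--     "M022": "in kitchen",
--     "M024": "in kitchen",
--     "T004": "in kitchen",
--     "M013": "in living room",
--     "M016": "in living room",
--     "M017": "in living room",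
--     "M018": "in living room",
--     "M023": "in living room",
--     "T003": "in living room",
--     "T005": "in living room",
--     "M014": "between living room and stairs",
--     "M015": "between living room and entrance door",
--     "M020": "between dining area and kitchen",
--     "M025": "between other room and garage",
--     "M026": "in laundry room near garage",
--     "M027": "near garage door",
-- }
--
--
-- def get_cairo_sensor_global_context(raw_sensor):
--     return _SENSOR_CONTEXT.get(raw_sensor)
-- ===== Notes on version B (the rewrite author's own statement) =====
-- stated objective: simpler
-- what changed: Replaced the loop over grouped tuple keys with a precomputed flat dict mapping each individual sensor code to its context, so the function body is a single dict .get lookup.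
import Mathlib
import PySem

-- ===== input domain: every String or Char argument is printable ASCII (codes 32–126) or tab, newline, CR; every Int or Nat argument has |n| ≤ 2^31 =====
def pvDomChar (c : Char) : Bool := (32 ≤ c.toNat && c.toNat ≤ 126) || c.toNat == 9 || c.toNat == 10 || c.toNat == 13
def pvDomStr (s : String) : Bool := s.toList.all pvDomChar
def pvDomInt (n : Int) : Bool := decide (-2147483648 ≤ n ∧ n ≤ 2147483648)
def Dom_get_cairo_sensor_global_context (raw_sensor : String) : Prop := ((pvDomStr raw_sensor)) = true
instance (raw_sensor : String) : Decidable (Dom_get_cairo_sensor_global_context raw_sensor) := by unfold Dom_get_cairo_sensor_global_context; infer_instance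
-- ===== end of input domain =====

-- B replaces A's scan over grouped tuple keys by one direct lookup in a flat per-code dict (objective: simpler).

-- ===== PORT A =====
-- the dict literal of A, as an insertion-ordered association list (tuple keys -> List String)
def pvSensorGroups : List (List String × String) :=
  [(["M001", "T002"], "in work area / office"),
     (["M002"], "in aisle near bedroom and guest bedroom"),
     (["M003"], "in aisle near stairs"),
     (["M004"], "in guest bedroom"),
     (["M005", "M006", "M007", "M008", "M009", "T001"], "in bedroom"),
     (["M010"], "near top of stairs"),
     (["M011"], "in living room near bottom of stairs"),
     (["M012", "M019", "M021", "M022", "M024", "T004"], "in kitchen"),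
     (["M013", "M016", "M017", "M018", "M023", "T003", "T005"], "in living room"),
     (["M014"], "between living room and stairs"),
     (["M015"], "between living room and entrance door"),
     (["M020"], "between dining area and kitchen"),
     (["M025"], "between other room and garage"),
     (["M026"], "in laundry room near garage"),
     (["M027"], "near garage door")]

-- the 'for sensor_codes, context in sensor_mapping.items(): if raw_sensor in sensor_codes: return context' loop
def pvScanGroups : List (List String × String) → String → Option String
  | [], _ => none
  | (codes, ctx) :: rest, s => if codes.contains s then some ctx else pvScanGroups rest s

def get_cairo_sensor_global_context (raw_sensor : String) : Option String :=
  pvScanGroups pvSensorGroups raw_sensor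

-- ===== PORT B =====
-- flat module-level dict of Source B, each individual code mapped to its context
def pvSensorContext : PySem.Dict String String :=
  PySem.Dict.ofList
  [("M001", "in work area / office"),
     ("T002", "in work area / office"),
     ("M002", "in aisle near bedroom and guest bedroom"),
     ("M003", "in aisle near stairs"),
     ("M004", "in guest bedroom"),
     ("M005", "in bedroom"),
     ("M006", "in bedroom"),
     ("M007", "in bedroom"),
     ("M008", "in bedroom"),
     ("M009", "in bedroom"),
     ("T001", "in bedroom"),
     ("M010", "near top of stairs"),
     ("M011", "in living room near bottom of stairs"),
     ("M012", "in kitchen"),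
     ("M019", "in kitchen"),
     ("M021", "in kitchen"),
     ("M022", "in kitchen"),
     ("M024", "in kitchen"),
     ("T004", "in kitchen"),
     ("M013", "in living room"),
     ("M016", "in living room"),
     ("M017", "in living room"),
     ("M018", "in living room"),
     ("M023", "in living room"),
     ("T003", "in living room"),
     ("T005", "in living room"),
     ("M014", "between living room and stairs"),
     ("M015", "between living room and entrance door"),
     ("M020", "between dining area and kitchen"),
     ("M025", "between other room and garage"),
     ("M026", "in laundry room near garage"),
     ("M027", "near garage door")]

def get_cairo_sensor_global_context_alt (raw_sensor : String) : Option String :=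
  pvSensorContext.get? raw_sensor

-- ===== PRECONDITION & SPEC =====
def Spec_get_cairo_sensor_global_context (raw_sensor : String) (out : Option String) : Prop := out = get_cairo_sensor_global_context_alt raw_sensor
instance (raw_sensor : String) (out : Option String) : Decidable (Spec_get_cairo_sensor_global_context raw_sensor out) := by unfold Spec_get_cairo_sensor_global_context; infer_instance

-- ===== CLAIM (what is proved, stated in full; the proofs are below) =====
def Claim_equal_get_cairo_sensor_global_context : Prop := ∀ (raw_sensor : String), Dom_get_cairo_sensor_global_context raw_sensor → Spec_get_cairo_sensor_global_context raw_sensor (get_cairo_sensor_global_context raw_sensor)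

-- ===== LEMMAS AND PROOFS =====

-- first-match lookup in a flattened block equals the group's membership test
theorem pvGet_mk_flat_block (codes : List String) (ctx : String)
    (rest : List (String × String)) (s : String) :
    (PySem.Dict.mk (codes.map (fun c => (c, ctx)) ++ rest)).get? s =
      if codes.contains s then some ctx else (PySem.Dict.mk rest).get? s := by
  induction codes with
  | nil => simp
  | cons c cs ih =>
    simp only [List.map_cons, List.cons_append, PySem.Dict.get?_mk_cons, ih,
      List.contains_cons]
    by_cases h : c = s
    · subst h; simp
    · have h1 : (c == s) = false := beq_eq_false_iff_ne.mpr h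
      have h2 : (s == c) = false := beq_eq_false_iff_ne.mpr (Ne.symm h)
      simp [h1, h2]

-- scanning the grouped mapping = first-match lookup in its flattening
theorem pvScan_eq_flat (groups : List (List String × String)) (s : String) :
    pvScanGroups groups s =
      (PySem.Dict.mk (groups.flatMap fun p => p.1.map (fun c => (c, p.2)))).get? s := by
  induction groups with
  | nil => simp [pvScanGroups, PySem.Dict.get?]
  | cons g gs ih =>
    simp only [pvScanGroups, List.flatMap_cons, pvGet_mk_flat_block, ih]

-- B's flat dict is exactly the flattening of A's grouped mapping
theorem pvFlat_eq :
    pvSensorContext =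
      PySem.Dict.mk (pvSensorGroups.flatMap fun p => p.1.map (fun c => (c, p.2))) := by
  decide

-- ===== VERDICT (by name: the statement is the Claim_ definition above) =====
theorem get_cairo_sensor_global_context_spec : Claim_equal_get_cairo_sensor_global_context := by
  intro s _
  unfold Spec_get_cairo_sensor_global_context get_cairo_sensor_global_context
    get_cairo_sensor_global_context_alt
  rw [pvScan_eq_flat, pvFlat_eq]
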